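-- pv_equiv track=rewrite | github.com/SinySs/Caches | LFU/tests/generate_tests/lfu_test.py | minn
-- ===== SOURCE A (Python) =====
-- def minn(arr):
--     min_ = arr[0]
--     n = 0
--     for i in range(len(arr)):
--         if arr[i] <= min_:
--             min_ = arr[i]
--             n = i
--     return n
-- ===== SOURCE B (Python) =====
-- def minn(arr):
--     m = min(arr)
--     return len(arr) - 1 - arr[::-1].index(m)
-- ===== Notes on version B (the rewrite author's own statement) =====
-- stated objective: alternative
-- what changed: Replaces the single running-best-index scan (state = current min and its latest index, <= ties) by a two-pass value-then-position decomposition: compute m = min(arr), then return len(arr) - 1 - arr[::-1].index(m), i.e. the last occurrence of the minimum.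
import Mathlib
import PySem

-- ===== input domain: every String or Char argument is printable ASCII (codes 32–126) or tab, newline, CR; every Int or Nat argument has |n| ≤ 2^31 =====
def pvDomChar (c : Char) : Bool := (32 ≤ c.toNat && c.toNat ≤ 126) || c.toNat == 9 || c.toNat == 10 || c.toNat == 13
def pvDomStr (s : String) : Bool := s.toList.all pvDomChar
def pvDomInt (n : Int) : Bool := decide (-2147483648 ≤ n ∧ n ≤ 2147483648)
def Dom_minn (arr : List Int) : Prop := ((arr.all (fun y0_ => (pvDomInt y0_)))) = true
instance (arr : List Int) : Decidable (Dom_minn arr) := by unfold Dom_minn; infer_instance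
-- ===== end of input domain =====

-- B replaces A's single running-best-index scan by a two-pass decomposition:
-- first m = min(arr), then the last occurrence of m via len(arr)-1-arr[::-1].index(m) (alternative; same cost).

-- ===== PORT A =====
-- min_ = arr[0]; n = 0; for i in range(len(arr)): if arr[i] <= min_: min_ = arr[i]; n = i; return n
def minn (arr : List Int) : Int :=
  match PySem.List.pyGet? arr 0 with
  | none => 0   -- IndexError: empty list, excluded by Pre_minn
  | some m0 =>
    ((PySem.List.pyRange 0 (arr.length : Int) 1).foldl
      (fun (st : Int × Int) i =>
        if PySem.List.pyGetD arr i 0 ≤ st.1 then (PySem.List.pyGetD arr i 0, i) else st)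
      (m0, 0)).2

-- ===== PORT B =====
-- m = min(arr); return len(arr) - 1 - arr[::-1].index(m)
def minn_alt (arr : List Int) : Int :=
  match PySem.List.min? arr (fun x => x) with
  | none => 0   -- ValueError: min of empty sequence, excluded by Pre_minn
  | some m =>
    match PySem.List.slice? arr none none (-1) with
    | none => 0   -- unreachable: step -1 never yields none
    | some rev =>
      match PySem.List.index? rev m with
      | none => 0   -- unreachable: m ∈ arr
      | some k => (arr.length : Int) - 1 - (k : Int)

-- ===== PRECONDITION & SPEC =====
-- A raises IndexError on the empty list (arr[0]); B raises ValueError there (min of empty).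
def Pre_minn (arr : List Int) : Prop := arr ≠ []
instance (arr : List Int) : Decidable (Pre_minn arr) := by unfold Pre_minn; infer_instance
def pvWitness_minn : List Int := [3, 1, 2, 1]

def Spec_minn (arr : List Int) (out : Int) : Prop := out = minn_alt arr
instance (arr : List Int) (out : Int) : Decidable (Spec_minn arr out) := by unfold Spec_minn; infer_instance

-- ===== CLAIM (what is proved, stated in full; the proofs are below) =====
def Claim_equal_minn : Prop := ∀ (arr : List Int), Dom_minn arr → Pre_minn arr → Spec_minn arr (minn arr)

-- ===== LEMMAS AND PROOFS =====

-- the minimum value of a nonempty list, as Python's min computes it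
def pvMv : List Int → Int
  | [] => 0
  | x :: t => t.foldl min x

-- A's loop body, over (index, value) pairs
def pvStep (st : Int × Int) (p : Int × Int) : Int × Int :=
  if p.2 ≤ st.1 then (p.2, p.1) else st

lemma pvMv_append_singleton (l : List Int) (x a : Int) :
    pvMv ((x :: l) ++ [a]) = min (pvMv (x :: l)) a := by
  simp [pvMv, List.foldl_append]

-- main invariant: A's fold state is (minimum, last index of minimum)
lemma pvKey (l : List Int) (h : l ≠ []) :
    ((PySem.List.enumerate l 0).foldl pvStep (l.head h, 0)).1 = pvMv l ∧
    ∃ k : Nat, PySem.List.index? l.reverse (pvMv l) = some k ∧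
      ((PySem.List.enumerate l 0).foldl pvStep (l.head h, 0)).2 = (l.length : Int) - 1 - (k : Int) := by
  induction l using List.reverseRecOn with
  | nil => exact absurd rfl h
  | append_singleton l a ih =>
    cases l with
    | nil =>
      refine ⟨?_, 0, ?_, ?_⟩ <;>
        simp [PySem.List.enumerate_cons, PySem.List.enumerate_nil, pvStep, pvMv]
    | cons x t =>
      obtain ⟨ih1, k, ihk, ih2⟩ := ih (by simp)
      have hhead : ((x :: t) ++ [a]).head (by simp) = (x :: t).head (by simp) := by
        simp
      have henum : PySem.List.enumerate ((x :: t) ++ [a]) 0 =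
          PySem.List.enumerate (x :: t) 0 ++ [(((x :: t).length : Int), a)] := by
        rw [PySem.List.enumerate_append]
        simp [PySem.List.enumerate_cons, PySem.List.enumerate_nil]
      rw [hhead, henum, List.foldl_append]
      set st := (PySem.List.enumerate (x :: t) 0).foldl pvStep ((x :: t).head (by simp), 0) with hst
      rw [pvMv_append_singleton]
      by_cases hle : a ≤ pvMv (x :: t)
      · have hmin : min (pvMv (x :: t)) a = a := min_eq_right hle
        have hstep : List.foldl pvStep st [(((x :: t).length : Int), a)] = (a, ((x :: t).length : Int)) := by
          simp [pvStep, ih1, hle]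
        refine ⟨by rw [hstep, hmin], 0, ?_, ?_⟩
        · rw [hmin]
          simp only [List.reverse_append, List.reverse_singleton, List.singleton_append]
          exact PySem.List.index?_cons_self ..
        · rw [hstep]
          simp
      · have hmin : min (pvMv (x :: t)) a = pvMv (x :: t) :=
          min_eq_left (le_of_lt (lt_of_not_ge hle))
        have hstep : List.foldl pvStep st [(((x :: t).length : Int), a)] = st := by
          simp [pvStep, ih1, hle]
        have hne : a ≠ pvMv (x :: t) := by
          intro hcontra; exact hle (le_of_eq hcontra)
        refine ⟨by rw [hstep, hmin, ih1], k + 1, ?_, ?_⟩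
        · rw [hmin]
          simp only [List.reverse_append, List.reverse_singleton, List.singleton_append]
          rw [PySem.List.index?_cons_of_ne _ hne, ihk]
          rfl
        · rw [hstep, ih2]
          simp only [List.length_append, List.length_cons, List.length_nil]
          push_cast
          ring

-- A's fold over pyRange of indices is the fold over enumerate
lemma pvA_eq_enum (arr : List Int) (h : arr ≠ []) :
    minn arr = ((PySem.List.enumerate arr 0).foldl pvStep (arr.head h, 0)).2 := by
  cases arr with
  | nil => exact absurd rfl h
  | cons x t =>
    show minn (x :: t) = _
    unfold minn
    rw [PySem.List.pyGet?_zero_cons]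
    rw [PySem.List.enumerate_eq_map_pyRange (d := 0), List.foldl_map]
    rfl

-- ===== VERDICT (by name: the statement is the Claim_ definition above) =====
theorem minn_spec : Claim_equal_minn := by
  intro arr _ hpre
  unfold Spec_minn
  obtain ⟨h1, k, hk, h2⟩ := pvKey arr hpre
  rw [pvA_eq_enum arr hpre, h2]
  unfold minn_alt
  have hmin : PySem.List.min? arr (fun x => x) = some (pvMv arr) := by
    cases arr with
    | nil => exact absurd rfl hpre
    | cons x t => simp [PySem.List.min?_id_cons, pvMv]
  have hk' : List.idxOf? (pvMv arr) arr.reverse = some k := by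
    rw [← PySem.List.index?_eq_idxOf?]; exact hk
  simp [hmin, PySem.List.slice?_none_none_neg_one, hk']
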